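-- pv_equiv track=rewrite | github.com/daniel-rosebrock/transcriptional_cascades | helper_funcs.py | update_shared_relationships
-- ===== SOURCE A (Python) =====
-- def update_shared_relationships(gene_relationships,gene_relat_all):
--     gene_relat_update = {}
--     for gene_relat in gene_relat_all:
--         for gene_check in gene_relat:
--             if gene_check not in gene_relat_update:
--                 gene_relat_update[gene_check] = set([])
--             gene_relat_update[gene_check].add(gene_relat[gene_check])
--     for gene_check in gene_relat_update:
--         if len(gene_relat_update[gene_check]) == 1:
--             gene_relationships[gene_check] = list(gene_relat_update[gene_check])[0]
--     return gene_relationships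
-- ===== SOURCE B (Python) =====
-- def update_shared_relationships(gene_relationships, gene_relat_all):
--     seen = {}
--     conflict = set()
--     for gene_relat in gene_relat_all:
--         for gene_check in gene_relat:
--             value = gene_relat[gene_check]
--             if gene_check in seen and seen[gene_check] != value:
--                 conflict.add(gene_check)
--             else:
--                 seen[gene_check] = value
--     for gene_check, value in seen.items():
--         if gene_check not in conflict:
--             gene_relationships[gene_check] = value
--     return gene_relationships
-- ===== Notes on version B (the rewrite author's own statement) =====
-- stated objective: alternative
-- what changed: Instead of accumulating a full set of observed values per gene and testing set size, B keeps only each gene's first observed value in `seen` plus a `conflict` set of genes that ever disagreed, then assigns the non-conflicting genes; what is maintained per gene drops from a set to a scalar plus a flag.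
import Mathlib
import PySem

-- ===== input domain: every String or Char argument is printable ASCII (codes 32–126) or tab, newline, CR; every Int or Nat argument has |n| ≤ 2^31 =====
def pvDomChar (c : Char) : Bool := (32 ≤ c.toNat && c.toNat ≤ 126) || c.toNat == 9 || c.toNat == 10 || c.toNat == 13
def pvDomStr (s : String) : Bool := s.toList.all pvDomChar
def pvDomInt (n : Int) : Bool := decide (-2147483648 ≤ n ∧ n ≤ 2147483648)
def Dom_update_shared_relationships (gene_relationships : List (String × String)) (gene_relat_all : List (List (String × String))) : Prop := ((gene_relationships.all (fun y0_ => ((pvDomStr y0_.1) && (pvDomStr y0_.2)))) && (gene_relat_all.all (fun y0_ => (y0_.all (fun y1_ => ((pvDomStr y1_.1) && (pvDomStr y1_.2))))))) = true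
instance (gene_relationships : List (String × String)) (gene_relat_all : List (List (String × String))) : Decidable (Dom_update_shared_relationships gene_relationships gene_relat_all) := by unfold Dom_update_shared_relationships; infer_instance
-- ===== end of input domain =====

-- B replaces A's per-gene set of observed values by each gene's first value plus a conflict set
-- (objective: alternative decomposition, same cost). A mutates its dict argument in place; the
-- equivalence proved here is about the RETURN value only.


-- ===== PORT A =====
-- one inner-loop body of A: 'if gene_check not in gene_relat_update: gene_relat_update[gene_check] = set([])'
-- then 'gene_relat_update[gene_check].add(gene_relat[gene_check])' (the pair p is (gene_check, gene_relat[gene_check]))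
def pvAStep (u : PySem.Dict String (PySem.Set String)) (p : String × String) : PySem.Dict String (PySem.Set String) :=
  let u' := if u.contains p.1 then u else u.insert p.1 PySem.Set.empty
  u'.modify p.1 PySem.Set.empty (fun s => PySem.Set.add s p.2)

def update_shared_relationships (gene_relationships : List (String × String)) (gene_relat_all : List (List (String × String))) : List (String × String) :=
  -- 'for gene_check in gene_relat: … gene_relat[gene_check]' = iterate the dict's (key, value) items
  let u : PySem.Dict String (PySem.Set String) :=
    gene_relat_all.foldl (fun u grel => (PySem.Dict.ofList grel).items.foldl pvAStep u) PySem.Dict.empty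
  -- 'list(s)[0]' with len(s) == 1 is s's unique element, hence order-independent: headD ""
  (u.items.foldl
    (fun g q => if q.2.length == 1 then g.insert q.1 (q.2.headD "") else g)
    (PySem.Dict.ofList gene_relationships)).items

-- ===== PORT B =====
-- one inner-loop body of B: record the first value in seen, flag later disagreeing genes in conflict
def pvBStep (sc : PySem.Dict String String × PySem.Set String) (p : String × String) : PySem.Dict String String × PySem.Set String :=
  match sc.1.get? p.1 with
  | some v => if v ≠ p.2 then (sc.1, PySem.Set.add sc.2 p.1) else (sc.1.insert p.1 p.2, sc.2)
  | none => (sc.1.insert p.1 p.2, sc.2)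

def update_shared_relationships_alt (gene_relationships : List (String × String)) (gene_relat_all : List (List (String × String))) : List (String × String) :=
  let sc : PySem.Dict String String × PySem.Set String :=
    gene_relat_all.foldl (fun sc grel => (PySem.Dict.ofList grel).items.foldl pvBStep sc)
      (PySem.Dict.empty, PySem.Set.empty)
  (sc.1.items.foldl
    (fun g q => if sc.2.contains q.1 then g else g.insert q.1 q.2)
    (PySem.Dict.ofList gene_relationships)).items

-- ===== PRECONDITION & SPEC =====
def Spec_update_shared_relationships (gene_relationships : List (String × String)) (gene_relat_all : List (List (String × String))) (out : List (String × String)) : Prop := out = update_shared_relationships_alt gene_relationships gene_relat_all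
instance (gene_relationships : List (String × String)) (gene_relat_all : List (List (String × String))) (out : List (String × String)) : Decidable (Spec_update_shared_relationships gene_relationships gene_relat_all out) := by unfold Spec_update_shared_relationships; infer_instance

-- ===== CLAIM (what is proved, stated in full; the proofs are below) =====
def Claim_equal_update_shared_relationships : Prop := ∀ (gene_relationships : List (String × String)) (gene_relat_all : List (List (String × String))), Dom_update_shared_relationships gene_relationships gene_relat_all → Spec_update_shared_relationships gene_relationships gene_relat_all (update_shared_relationships gene_relationships gene_relat_all)

-- ===== LEMMAS AND PROOFS =====

-- the coupling invariant between A's state u and B's state (seen, conflict)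
def pvInv (u : PySem.Dict String (PySem.Set String)) (sc : PySem.Dict String String × PySem.Set String) : Prop :=
  u.keys.Nodup ∧
  sc.1.items = u.items.map (fun q => (q.1, q.2.headD "")) ∧
  (∀ q ∈ u.items, q.2 ≠ []) ∧
  (∀ k : String, k ∈ sc.2 ↔ ∃ s, u.get? k = some s ∧ s.length ≠ 1)

theorem pvInv_empty : pvInv PySem.Dict.empty (PySem.Dict.empty, PySem.Set.empty) := by
  refine ⟨by simp [PySem.Dict.keys, PySem.Dict.empty], by simp [PySem.Dict.empty], ?_, ?_⟩
  · simp [PySem.Dict.empty]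
  · intro k; simp [PySem.Set.empty, PySem.Dict.get?_empty]

theorem pv_get?_of_items_map (u : PySem.Dict String (PySem.Set String)) (m : PySem.Dict String String)
    (f : PySem.Set String → String)
    (h : m.items = u.items.map (fun q => (q.1, f q.2))) (k : String) :
    m.get? k = (u.get? k).map f := by
  simp only [PySem.Dict.get?, h]
  simp [List.find?_map, Option.map_map, Function.comp_def]

theorem pv_insert_of_get?_eq_some {ν : Type} (d : PySem.Dict String ν) (k : String) (v : ν)
    (hnd : d.keys.Nodup) (h : d.get? k = some v) : d.insert k v = d := by
  have hc : d.contains k = true := by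
    rw [PySem.Dict.contains_eq_isSome_get?, h]; rfl
  apply PySem.Dict.ext
  rw [PySem.Dict.items_insert_of_contains _ _ hc]
  conv_rhs => rw [← List.map_id d.items]
  apply List.map_congr_left
  intro q hq
  obtain ⟨q1, q2⟩ := q
  by_cases hqk : (q1 == k) = true
  · have hk : q1 = k := eq_of_beq hqk
    have hv : d.get? q1 = some q2 := PySem.Dict.get?_of_mem_items _ hq hnd
    rw [hk, h] at hv
    have : v = q2 := Option.some_inj.mp hv
    simp [hk, this]
  · simp [hqk]

theorem pvStep_inv (u : PySem.Dict String (PySem.Set String)) (sc : PySem.Dict String String × PySem.Set String)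
    (p : String × String) (h : pvInv u sc) : pvInv (pvAStep u p) (pvBStep sc p) := by
  obtain ⟨hnd, hseen, hne, hconf⟩ := h
  obtain ⟨k, v⟩ := p
  have hget : sc.1.get? k = (u.get? k).map (fun s => s.headD "") :=
    pv_get?_of_items_map u sc.1 _ hseen k
  by_cases hc : u.contains k = true
  · -- the gene already has an entry
    obtain ⟨s, hs⟩ : ∃ s, u.get? k = some s := by
      rw [PySem.Dict.contains_eq_isSome_get?] at hc
      exact Option.isSome_iff_exists.mp hc
    have hsne : s ≠ [] := hne _ (PySem.Dict.mem_items_of_get?_eq_some _ hs)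
    have hA : pvAStep u (k, v) = u.insert k (PySem.Set.add s v) := by
      simp only [pvAStep, hc, if_true]
      simp [PySem.Dict.modify, PySem.Dict.getD_of_get?_eq_some _ _ hs]
    have hB : sc.1.get? k = some (s.headD "") := by rw [hget, hs]; rfl
    by_cases hv : s.headD "" = v
    · -- same value again: both states are unchanged
      have hvm : v ∈ s := by rw [← hv]; cases s <;> simp_all
      have hadd : PySem.Set.add s v = s := by simp [PySem.Set.add, hvm]
      have hA' : pvAStep u (k, v) = u := by
        rw [hA, hadd]; exact pv_insert_of_get?_eq_some u k s hnd hs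
      have hkeys : sc.1.keys = u.keys := by
        simp only [PySem.Dict.keys, hseen, List.map_map]; rfl
      have hB' : pvBStep sc (k, v) = sc := by
        simp only [pvBStep, hB]
        rw [if_neg (by simpa using hv)]
        have := pv_insert_of_get?_eq_some sc.1 k v (by rw [hkeys]; exact hnd) (by rw [hB, hv])
        simp [this]
      rw [hA', hB']; exact ⟨hnd, hseen, hne, hconf⟩
    · -- a different value: A's set grows past size 1, B flags the gene
      have hB' : pvBStep sc (k, v) = (sc.1, PySem.Set.add sc.2 k) := by
        simp only [pvBStep, hB]; rw [if_pos (by simpa using hv)]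
      have hhead : (PySem.Set.add s v).headD "" = s.headD "" := by
        by_cases hvs : v ∈ s
        · simp [PySem.Set.add, hvs]
        · simp only [PySem.Set.add]
          rw [if_neg (by simp [hvs])]
          cases s <;> simp_all
      have haddne : PySem.Set.add s v ≠ [] := by
        by_cases hvs : v ∈ s
        · simpa [PySem.Set.add, hvs] using hsne
        · simp [PySem.Set.add, hvs]
      have hlen : (PySem.Set.add s v).length ≠ 1 := by
        by_cases hvs : v ∈ s
        · simp only [PySem.Set.add]
          rw [if_pos (by simp [hvs])]
          cases s with
          | nil => simp_all
          | cons a t =>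
            cases t with
            | nil => simp_all
            | cons b t' => simp
        · simp only [PySem.Set.add]
          rw [if_neg (by simp [hvs])]
          cases s <;> simp_all
      rw [hA, hB']
      refine ⟨PySem.Dict.nodup_keys_insert _ _ _ hnd, ?_, ?_, ?_⟩
      · rw [PySem.Dict.items_insert_of_contains _ _ hc, List.map_map, hseen]
        apply List.map_congr_left
        intro q hq
        obtain ⟨q1, q2⟩ := q
        by_cases hqk : (q1 == k) = true
        · have hk1 : q1 = k := eq_of_beq hqk
          have hq2 : u.get? q1 = some q2 := PySem.Dict.get?_of_mem_items _ hq hnd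
          rw [hk1, hs] at hq2
          cases Option.some_inj.mp hq2
          have hhead' : (s.add v).head?.getD "" = s.head?.getD "" := by simpa using hhead
          simp [hk1, hhead']
        · have hq1k : ¬ q1 = k := by simpa using hqk
          simp [hq1k]
      · intro q hq
        rw [PySem.Dict.mem_items_insert] at hq
        rcases hq with hq | ⟨hq, _⟩
        · rw [hq]; exact haddne
        · exact hne _ hq
      · intro k'
        rw [PySem.Set.mem_add]
        by_cases hkk : k' = k
        · subst hkk
          simp only [PySem.Dict.get?_insert_self]
          constructor
          · intro _; exact ⟨_, rfl, hlen⟩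
          · intro _; simp
        · rw [PySem.Dict.get?_insert_of_ne _ _ hkk]
          constructor
          · rintro (hm | hm)
            · exact (hconf k').mp hm
            · exact absurd hm hkk
          · intro hx; exact Or.inl ((hconf k').mpr hx)
  · -- first occurrence of the gene
    have hcf : u.contains k = false := by simpa using hc
    have hu : u.get? k = none := (PySem.Dict.get?_eq_none_iff_contains _ _).mpr hcf
    have hA : pvAStep u (k, v) = u.insert k [v] := by
      simp only [pvAStep, hcf, Bool.false_eq_true, if_false]
      simp [PySem.Dict.modify, PySem.Dict.getD_insert_self, PySem.Dict.insert_insert_self,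
        PySem.Set.add, PySem.Set.empty]
    have hscn : sc.1.get? k = none := by rw [hget, hu]; rfl
    have hB' : pvBStep sc (k, v) = (sc.1.insert k v, sc.2) := by
      simp only [pvBStep, hscn]
    have hscc : sc.1.contains k = false := by
      rw [PySem.Dict.contains_eq_isSome_get?, hscn]; rfl
    rw [hA, hB']
    refine ⟨PySem.Dict.nodup_keys_insert _ _ _ hnd, ?_, ?_, ?_⟩
    · rw [PySem.Dict.items_insert_of_not_contains _ _ hcf,
        PySem.Dict.items_insert_of_not_contains _ _ hscc, List.map_append, hseen]
      rfl
    · intro q hq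
      rw [PySem.Dict.items_insert_of_not_contains _ _ hcf, List.mem_append] at hq
      rcases hq with hq | hq
      · exact hne _ hq
      · simp_all
    · intro k'
      by_cases hkk : k' = k
      · subst hkk
        simp only [PySem.Dict.get?_insert_self]
        constructor
        · intro hm
          obtain ⟨s, hs', _⟩ := (hconf k').mp hm
          rw [hu] at hs'; cases hs'
        · rintro ⟨s, hs', hlen'⟩
          cases Option.some_inj.mp hs'
          simp at hlen'
      · rw [PySem.Dict.get?_insert_of_ne _ _ hkk]
        exact hconf k'

theorem pvFold_inv (l : List (String × String)) (u : PySem.Dict String (PySem.Set String))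
    (sc : PySem.Dict String String × PySem.Set String) (h : pvInv u sc) :
    pvInv (l.foldl pvAStep u) (l.foldl pvBStep sc) := by
  induction l generalizing u sc with
  | nil => exact h
  | cons p l ih => exact ih _ _ (pvStep_inv u sc p h)

theorem pvFoldAll_inv (all : List (List (String × String))) (u : PySem.Dict String (PySem.Set String))
    (sc : PySem.Dict String String × PySem.Set String) (h : pvInv u sc) :
    pvInv (all.foldl (fun u grel => (PySem.Dict.ofList grel).items.foldl pvAStep u) u)
          (all.foldl (fun sc grel => (PySem.Dict.ofList grel).items.foldl pvBStep sc) sc) := by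
  induction all generalizing u sc with
  | nil => exact h
  | cons grel all ih => exact ih _ _ (pvFold_inv _ u sc h)

theorem pvFinal (u : PySem.Dict String (PySem.Set String)) (sc : PySem.Dict String String × PySem.Set String)
    (h : pvInv u sc) (g0 : PySem.Dict String String) :
    u.items.foldl (fun g q => if q.2.length == 1 then g.insert q.1 (q.2.headD "") else g) g0
      = sc.1.items.foldl (fun g q => if sc.2.contains q.1 then g else g.insert q.1 q.2) g0 := by
  obtain ⟨hnd, hseen, hne, hconf⟩ := h
  rw [hseen, List.foldl_map]
  apply PySem.List.foldl_congr_mem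
  intro g q hq
  obtain ⟨q1, q2⟩ := q
  have hg : u.get? q1 = some q2 := PySem.Dict.get?_of_mem_items _ hq hnd
  have hmem : q1 ∈ sc.2 ↔ q2.length ≠ 1 := by
    rw [hconf q1]
    constructor
    · rintro ⟨s, hs, hlen⟩
      rw [hg] at hs
      cases Option.some_inj.mp hs
      exact hlen
    · intro hlen; exact ⟨q2, hg, hlen⟩
  by_cases hl : q2.length = 1
  · have h2 : ¬ q1 ∈ sc.2 := by simp [hmem, hl]
    simp [hl, h2]
  · have h2 : q1 ∈ sc.2 := hmem.mpr hl
    simp [hl, h2]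

-- ===== VERDICT (by name: the statement is the Claim_ definition above) =====
theorem update_shared_relationships_spec : Claim_equal_update_shared_relationships := by
  intro gr all _
  unfold Spec_update_shared_relationships update_shared_relationships update_shared_relationships_alt
  exact congrArg PySem.Dict.items (pvFinal _ _ (pvFoldAll_inv all _ _ pvInv_empty) (PySem.Dict.ofList gr))
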